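-- pv_equiv track=rewrite | github.com/Ayoubioussoufa/leet | easy/WinnerOfBowling.py | isWinner
-- ===== SOURCE A (Python) =====
-- from typing import List
--
-- def isWinner(player1: List[int], player2: List[int]) -> int:
--     def scores(nums):
--         res = 0
--         prev1 = 0
--         prev2 = 0
--         for n in nums:
--             if prev1 == 10 or prev2 == 10:
--                 res += 2 * n
--             else:
--                 res += n
--             prev2 = prev1
--             prev1 = n
--         return res
--
--     s1 = scores(player1)
--     s2 = scores(player2)
--
--     if s1 == s2:
--         return 0
--     return 1 if s1 > s2 else 2
-- ===== SOURCE B (Python) =====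
-- from typing import List
--
-- def isWinner(player1: List[int], player2: List[int]) -> int:
--     def scores(nums):
--         doubled = set()
--         for i in range(len(nums)):
--             if nums[i] == 10:
--                 if i + 1 < len(nums):
--                     doubled.add(i + 1)
--                 if i + 2 < len(nums):
--                     doubled.add(i + 2)
--         return sum(nums) + sum(nums[j] for j in doubled)
--
--     s1 = scores(player1)
--     s2 = scores(player2)
--     if s1 == s2:
--         return 0
--     return 1 if s1 > s2 else 2
-- ===== Notes on version B (the rewrite author's own statement) =====
-- stated objective: alternative
-- what changed: Replaces the backward two-variable sliding state (prev1/prev2) with base-sum plus a forward strike-propagation: a set of indices to double is built by scanning for strikes and the bonus is summed in a second pass.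
import Mathlib
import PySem

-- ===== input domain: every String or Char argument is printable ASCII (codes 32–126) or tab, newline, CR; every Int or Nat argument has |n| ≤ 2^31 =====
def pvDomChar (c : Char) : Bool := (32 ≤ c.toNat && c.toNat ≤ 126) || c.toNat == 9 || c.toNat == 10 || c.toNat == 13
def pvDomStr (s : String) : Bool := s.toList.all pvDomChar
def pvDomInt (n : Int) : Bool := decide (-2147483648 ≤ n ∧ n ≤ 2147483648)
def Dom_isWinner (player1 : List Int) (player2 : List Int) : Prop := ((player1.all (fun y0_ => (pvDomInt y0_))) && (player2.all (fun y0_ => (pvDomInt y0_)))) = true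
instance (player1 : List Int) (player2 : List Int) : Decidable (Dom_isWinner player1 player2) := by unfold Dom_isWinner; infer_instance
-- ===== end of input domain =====

-- B replaces A's backward two-variable sliding state with base-sum plus a set of strike-propagated
-- indices summed in a second pass (objective: alternative decomposition, same O(n) cost).

-- ===== PORT A =====
-- the loop body of A's inner `scores`: state (res, prev1, prev2)
def pvAStep (st : Int × Int × Int) (n : Int) : Int × Int × Int :=
  (if st.2.1 = 10 ∨ st.2.2 = 10 then st.1 + 2 * n else st.1 + n, n, st.2.1)

def pvAScores (nums : List Int) : Int := (nums.foldl pvAStep (0, 0, 0)).1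

def isWinner (player1 : List Int) (player2 : List Int) : Int :=
  let s1 := pvAScores player1
  let s2 := pvAScores player2
  if s1 = s2 then 0 else if s1 > s2 then 1 else 2

-- ===== PORT B =====
-- Source B's loop: for i in range(len(nums)): if nums[i]==10 add i+1, i+2 (when in range) to the set
def pvBStep (nums : List Int) (s : PySem.Set Nat) (i : Nat) : PySem.Set Nat :=
  if nums.getD i 0 = 10 then
    let s1 := if i + 1 < nums.length then PySem.Set.add s (i + 1) else s
    if i + 2 < nums.length then PySem.Set.add s1 (i + 2) else s1
  else s

def pvBDoubled (nums : List Int) : PySem.Set Nat :=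
  (List.range nums.length).foldl (pvBStep nums) PySem.Set.empty

def pvBScores (nums : List Int) : Int :=
  nums.sum + ((pvBDoubled nums).map (fun j => nums.getD j 0)).sum

def isWinner_alt (player1 : List Int) (player2 : List Int) : Int :=
  let s1 := pvBScores player1
  let s2 := pvBScores player2
  if s1 = s2 then 0 else if s1 > s2 then 1 else 2

-- ===== PRECONDITION & SPEC =====
def Spec_isWinner (player1 : List Int) (player2 : List Int) (out : Int) : Prop := out = isWinner_alt player1 player2
instance (player1 : List Int) (player2 : List Int) (out : Int) : Decidable (Spec_isWinner player1 player2 out) := by unfold Spec_isWinner; infer_instance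

-- ===== CLAIM (what is proved, stated in full; the proofs are below) =====
def Claim_equal_isWinner : Prop := ∀ (player1 : List Int) (player2 : List Int), Dom_isWinner player1 player2 → Spec_isWinner player1 player2 (isWinner player1 player2)

-- ===== LEMMAS AND PROOFS =====

-- the doubling bonus of A's loop, as a recursion over the list with the two carried prevs
def pvD (a b : Int) : List Int → Int
  | [] => 0
  | n :: t => (if a = 10 ∨ b = 10 then n else 0) + pvD n a t

-- "index j of nums is doubled" given virtual predecessors a (prev1) and b (prev2)
def pvCond (a b : Int) (nums : List Int) (j : Nat) : Bool :=
  if j = 0 then decide (a = 10 ∨ b = 10)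
  else if j = 1 then decide (nums.getD 0 0 = 10 ∨ a = 10)
  else decide (nums.getD (j-1) 0 = 10 ∨ nums.getD (j-2) 0 = 10)

theorem pvA_foldl (t : List Int) : ∀ (r a b : Int),
    (t.foldl pvAStep (r, a, b)).1 = r + t.sum + pvD a b t := by
  induction t with
  | nil => intro r a b; simp [pvD]
  | cons n t ih =>
    intro r a b
    simp only [List.foldl_cons, pvAStep, pvD, List.sum_cons, ih]
    split_ifs <;> ring

theorem pvCond_succ (a b n : Int) (t : List Int) (j : Nat) :
    pvCond a b (n :: t) (j + 1) = pvCond n a t j := by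
  match j with
  | 0 => simp [pvCond]
  | 1 => simp [pvCond]
  | (k+2) => simp [pvCond]

theorem pvCond_true_iff (nums : List Int) (j : Nat) :
    pvCond 0 0 nums j = true ↔
      ((1 ≤ j ∧ nums.getD (j-1) 0 = 10) ∨ (2 ≤ j ∧ nums.getD (j-2) 0 = 10)) := by
  match j with
  | 0 => simp [pvCond]
  | 1 => simp [pvCond]
  | (k+2) => simp [pvCond, or_comm]

theorem pvD_eq_range (nums : List Int) : ∀ (a b : Int),
    pvD a b nums = ((List.range nums.length).map
      (fun j => if pvCond a b nums j then nums.getD j 0 else 0)).sum := by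
  induction nums with
  | nil => intro a b; simp [pvD]
  | cons n t ih =>
    intro a b
    rw [pvD, List.length_cons, List.range_succ_eq_map, List.map_cons, List.sum_cons,
      List.map_map, ih n a]
    have h1 : (if pvCond a b (n :: t) 0 then (n :: t).getD 0 0 else 0)
        = (if a = 10 ∨ b = 10 then n else 0) := by
      simp [pvCond]
    have h2 : (List.range t.length).map
          ((fun j => if pvCond a b (n :: t) j then (n :: t).getD j 0 else 0) ∘ Nat.succ)
        = (List.range t.length).map (fun j => if pvCond n a t j then t.getD j 0 else 0) := by
      apply List.map_congr_left
      intro j _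
      simp only [Function.comp_apply, Nat.succ_eq_add_one, pvCond_succ, List.getD_cons_succ]
    rw [h1, h2]

theorem pvMem_foldl (nums : List Int) (l : List Nat) : ∀ (s : PySem.Set Nat) (j : Nat),
    j ∈ l.foldl (pvBStep nums) s ↔ j ∈ s ∨ ∃ i ∈ l, nums.getD i 0 = 10 ∧
      ((j = i + 1 ∧ i + 1 < nums.length) ∨ (j = i + 2 ∧ i + 2 < nums.length)) := by
  induction l with
  | nil => intro s j; simp
  | cons i l ih =>
    intro s j
    rw [List.foldl_cons, ih]
    have hstep : j ∈ pvBStep nums s i ↔ j ∈ s ∨ (nums.getD i 0 = 10 ∧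
        ((j = i + 1 ∧ i + 1 < nums.length) ∨ (j = i + 2 ∧ i + 2 < nums.length))) := by
      unfold pvBStep
      by_cases h10 : nums.getD i 0 = 10
      all_goals simp only [List.getD_eq_getElem?_getD] at h10 ⊢
      · by_cases ha : i + 1 < nums.length <;> by_cases hb : i + 2 < nums.length <;>
          (simp [h10, ha, hb, PySem.Set.mem_add]; try tauto)
      · simp [h10]
    rw [hstep]
    simp only [List.mem_cons]
    constructor
    · rintro (⟨h | h⟩ | ⟨i', hi', h⟩)
      · exact Or.inl h
      · exact Or.inr ⟨i, Or.inl rfl, h⟩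
      · exact Or.inr ⟨i', Or.inr hi', h⟩
    · rintro (h | ⟨i', (rfl | hi'), h⟩)
      · exact Or.inl (Or.inl h)
      · exact Or.inl (Or.inr h)
      · exact Or.inr ⟨i', hi', h⟩

theorem pvNodup_foldl (nums : List Int) (l : List Nat) : ∀ (s : PySem.Set Nat),
    s.Nodup → (l.foldl (pvBStep nums) s).Nodup := by
  induction l with
  | nil => intro s hs; simpa using hs
  | cons i l ih =>
    intro s hs
    rw [List.foldl_cons]
    apply ih
    unfold pvBStep
    split_ifs <;> first
      | exact hs
      | exact PySem.Set.nodup_add _ _ hs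
      | exact PySem.Set.nodup_add _ _ (PySem.Set.nodup_add _ _ hs)

theorem pvMem_bDoubled (nums : List Int) (j : Nat) :
    j ∈ pvBDoubled nums ↔ j < nums.length ∧ pvCond 0 0 nums j = true := by
  rw [pvBDoubled, pvMem_foldl]
  simp only [PySem.Set.empty, List.not_mem_nil, false_or, List.mem_range, pvCond_true_iff]
  constructor
  · rintro ⟨i, hi, h10, (⟨rfl, hlt⟩ | ⟨rfl, hlt⟩)⟩
    · exact ⟨hlt, Or.inl ⟨by omega, by simpa using h10⟩⟩
    · exact ⟨hlt, Or.inr ⟨by omega, by simpa using h10⟩⟩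
  · rintro ⟨hj, (⟨h1, h10⟩ | ⟨h2, h10⟩)⟩
    · refine ⟨j - 1, by omega, h10, Or.inl ⟨by omega, by omega⟩⟩
    · refine ⟨j - 2, by omega, h10, Or.inr ⟨by omega, by omega⟩⟩

theorem pvFilter_map_sum (f : Nat → Int) (p : Nat → Bool) (l : List Nat) :
    ((l.filter p).map f).sum = (l.map (fun j => if p j then f j else 0)).sum := by
  induction l with
  | nil => simp
  | cons x l ih =>
    by_cases h : p x <;> simp [h, ih]

theorem pvScores_eq (nums : List Int) : pvAScores nums = pvBScores nums := by
  have hnd : (pvBDoubled nums).Nodup := by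
    rw [pvBDoubled]
    exact pvNodup_foldl nums _ _ (by simp [PySem.Set.empty])
  have hperm : (pvBDoubled nums).Perm
      ((List.range nums.length).filter (fun j => pvCond 0 0 nums j)) := by
    rw [List.perm_ext_iff_of_nodup hnd (List.nodup_range.filter _)]
    intro j
    simp only [pvMem_bDoubled, List.mem_filter, List.mem_range]
  have hsum : ((pvBDoubled nums).map (fun j => nums.getD j 0)).sum
      = pvD 0 0 nums := by
    rw [(hperm.map (fun j => nums.getD j 0)).sum_eq, pvFilter_map_sum,
      pvD_eq_range nums 0 0]
  rw [pvAScores, pvA_foldl, pvBScores, hsum]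
  ring

-- ===== VERDICT (by name: the statement is the Claim_ definition above) =====
theorem isWinner_spec : Claim_equal_isWinner := by
  intro p1 p2 _
  unfold Spec_isWinner isWinner isWinner_alt
  rw [pvScores_eq, pvScores_eq]
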